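-- pv_equiv track=rewrite | github.com/kartonios/InfaEGE | Zadacha 3.py | f
-- ===== SOURCE A (Python) =====
-- def f(s, n):
--     if s > n:
--         return 0
--     if s == n:
--         return 1
--
--     res = f(s, n-3)
--     if n % 2 == 0:
--         res += f(s, n-2) + f(s, n-1)
--
--     return res
-- ===== SOURCE B (Python) =====
-- def f(s, n):
--     # Iterative bottom-up DP from s up to n keeping a sliding window of the last three values.
--     if n < s:
--         return 0
--     a, b, c = 0, 0, 1  # (f(s, k-3), f(s, k-2), f(s, k-1)) just before processing k; c == f(s, s) initially
--     for k in range(s + 1, n + 1):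
--         new = a + ((b + c) if k % 2 == 0 else 0)
--         a, b, c = b, c, new
--     return c
-- ===== Notes on version B (the rewrite author's own statement) =====
-- stated objective: alternative
-- what changed: Replaced A's top-down triple recursion with an iterative bottom-up DP from s to n that keeps only a sliding window of the last three values.
import Mathlib
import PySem

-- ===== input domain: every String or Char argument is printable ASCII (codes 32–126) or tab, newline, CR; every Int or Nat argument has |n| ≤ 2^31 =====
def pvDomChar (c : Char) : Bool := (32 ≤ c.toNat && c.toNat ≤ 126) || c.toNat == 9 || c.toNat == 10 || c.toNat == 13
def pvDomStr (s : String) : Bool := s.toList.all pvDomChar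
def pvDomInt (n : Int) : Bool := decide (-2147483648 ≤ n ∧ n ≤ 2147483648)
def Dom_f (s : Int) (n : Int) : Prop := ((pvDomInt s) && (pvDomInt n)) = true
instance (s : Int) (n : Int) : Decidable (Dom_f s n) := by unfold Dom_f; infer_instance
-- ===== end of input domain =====

-- B replaces A's top-down triple recursion by an iterative bottom-up sliding-window DP from s up to n (objective: alternative).

-- ===== PORT A =====
def f (s : Int) (n : Int) : Int :=
  if s > n then 0
  else if s = n then 1
  else
    let res := f s (n - 3)
    if PySem.Int.mod n 2 = 0 then res + (f s (n - 2) + f s (n - 1)) else res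
termination_by (n - s).toNat
decreasing_by all_goals omega

-- ===== PORT B =====
def fStep (st : Int × Int × Int) (k : Int) : Int × Int × Int :=
  (st.2.1, st.2.2, st.1 + (if PySem.Int.mod k 2 = 0 then st.2.1 + st.2.2 else 0))

def f_alt (s : Int) (n : Int) : Int :=
  if n < s then 0
  else ((PySem.List.pyRange (s + 1) (n + 1) 1).foldl fStep (0, 0, 1)).2.2

-- ===== PRECONDITION & SPEC =====
-- Pre_ excludes inputs with n - s > 2800: there A's recursion depth (about (n-s)/3 frames) reaches
-- CPython's default recursion limit and A raises RecursionError; the margin below the exact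
-- overflow point (~2970) covers variation in the interpreter's pre-existing stack depth.
def Pre_f (s : Int) (n : Int) : Prop := n - s ≤ 2800
instance (s : Int) (n : Int) : Decidable (Pre_f s n) := by unfold Pre_f; infer_instance
def pvWitness_f : Int × Int := (0, 5)

def Spec_f (s : Int) (n : Int) (out : Int) : Prop := out = f_alt s n
instance (s : Int) (n : Int) (out : Int) : Decidable (Spec_f s n out) := by unfold Spec_f; infer_instance

-- ===== CLAIM (what is proved, stated in full; the proofs are below) =====
def Claim_equal_f : Prop := ∀ (s : Int) (n : Int), Dom_f s n → Pre_f s n → Spec_f s n (f s n)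

-- ===== LEMMAS AND PROOFS =====

lemma f_of_lt (s n : Int) (h : n < s) : f s n = 0 := by
  unfold f; simp [show s > n from h]

lemma fold_inv (s : Int) : ∀ (m : Nat) (n : Int), n - s = (m : Int) →
    (PySem.List.pyRange (s + 1) (n + 1) 1).foldl fStep (0, 0, 1)
      = (f s (n - 2), f s (n - 1), f s n) := by
  intro m
  induction m with
  | zero =>
    intro n hn
    have hsn : n = s := by omega
    rw [show PySem.List.pyRange (s + 1) (n + 1) 1 = [] from by
      simp [PySem.List.pyRange_one]; omega]
    simp only [List.foldl_nil]
    rw [f_of_lt s (n - 2) (by omega), f_of_lt s (n - 1) (by omega)]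
    have : f s n = 1 := by unfold f; simp [hsn.symm]
    rw [this]
  | succ m ih =>
    intro n hn
    have hlt : s < n := by omega
    have h1 : PySem.List.pyRange (s + 1) (n + 1) 1
        = PySem.List.pyRange (s + 1) n 1 ++ [n] := by
      exact PySem.List.pyRange_one_succ_right (by omega)
    have h2 : PySem.List.pyRange (s + 1) n 1
        = PySem.List.pyRange (s + 1) ((n - 1) + 1) 1 := by norm_num
    rw [h1, h2, List.foldl_append, ih (n - 1) (by omega)]
    simp only [List.foldl_cons, List.foldl_nil]
    rw [show n - 1 - 2 = n - 3 from by ring, show n - 1 - 1 = n - 2 from by ring]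
    unfold fStep
    refine Prod.ext (by norm_num) (Prod.ext (by norm_num) ?_)
    show f s (n - 3) + (if PySem.Int.mod n 2 = 0 then f s (n - 2) + f s (n - 1) else 0) = f s n
    conv_rhs => rw [f]
    simp only [show ¬ s > n from by omega, show ¬ s = n from by omega, if_false]
    split_ifs <;> ring

-- ===== VERDICT (by name: the statement is the Claim_ definition above) =====
theorem f_spec : Claim_equal_f := by
  intro s n _ _
  unfold Spec_f f_alt
  split_ifs with h
  · exact f_of_lt s n h
  · have := fold_inv s (n - s).toNat n (by omega)
    rw [this]
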